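-- pv_equiv track=rewrite | github.com/dishb/firestarter | firestarter/_utils/_check_dupes.py | _check_dupes
-- ===== SOURCE A (Python) =====
-- def _check_dupes(lines: list[str]) -> bool:
--     """
--     Checks if a given list, representing the lines of a file, have duplicates.
--
--     Args:
--         lines (list[str]): A list to represent all the lines of a file, where each line is a
--         string.
--
--     Returns:
--         bool: Whether or not the list contains duplicate values.
--     """
--
--     seen = set()
--
--     for line in lines:
--         if line != "" and line[0] != "$":
--             if line in seen:
--                 return True
--             else:
--                 seen.add(line)
--
--     return False
-- ===== SOURCE B (Python) =====
-- def _check_dupes(lines: list[str]) -> bool: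
--     filtered = [line for line in lines if line != "" and line[0] != "$"]
--     return len(filtered) != len(set(filtered))
-- ===== Notes on version B (the rewrite author's own statement) =====
-- stated objective: simpler
-- what changed: Replaces the early-exit scan with a mutated seen-set by a single comprehension filtering the relevant lines followed by one cardinality comparison len(filtered) != len(set(filtered)); no per-element membership test or early return remains.
import Mathlib
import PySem

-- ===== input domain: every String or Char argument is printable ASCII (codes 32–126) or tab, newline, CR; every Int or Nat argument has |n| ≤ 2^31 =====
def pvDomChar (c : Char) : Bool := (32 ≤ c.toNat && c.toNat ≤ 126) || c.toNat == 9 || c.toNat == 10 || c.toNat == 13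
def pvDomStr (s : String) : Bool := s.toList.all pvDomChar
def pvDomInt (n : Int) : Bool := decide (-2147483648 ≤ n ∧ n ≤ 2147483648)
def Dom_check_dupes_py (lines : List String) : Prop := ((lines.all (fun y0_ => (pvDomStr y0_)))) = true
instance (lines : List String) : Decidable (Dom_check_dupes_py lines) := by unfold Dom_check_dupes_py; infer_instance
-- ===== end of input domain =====

-- B replaces A's early-exit scan with a mutated seen-set by one filter plus a
-- cardinality comparison (simpler decomposition; same complexity).

-- ===== PORT A =====
-- the for-loop of A: carries the mutable 'seen' set, early return on a hit
def check_dupes_py_loop (xs : List String) (seen : PySem.Set String) : Bool :=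
  match xs with
  | [] => false
  | l :: rest =>
    if l ≠ "" ∧ PySem.Str.pyGet? l 0 ≠ some '$' then
      if PySem.Set.contains seen l then true
      else check_dupes_py_loop rest (PySem.Set.add seen l)
    else check_dupes_py_loop rest seen

def check_dupes_py (lines : List String) : Bool :=
  check_dupes_py_loop lines PySem.Set.empty

-- ===== PORT B =====
def check_dupes_py_alt (lines : List String) : Bool :=
  let filtered := lines.filter (fun l => decide (l ≠ "" ∧ PySem.Str.pyGet? l 0 ≠ some '$'))
  decide (PySem.List.len filtered ≠ PySem.Set.len (PySem.Set.ofList filtered))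

-- ===== PRECONDITION & SPEC =====
def Spec_check_dupes_py (lines : List String) (out : Bool) : Prop := out = check_dupes_py_alt lines
instance (lines : List String) (out : Bool) : Decidable (Spec_check_dupes_py lines out) := by unfold Spec_check_dupes_py; infer_instance

-- ===== CLAIM (what is proved, stated in full; the proofs are below) =====
def Claim_equal_check_dupes_py : Prop := ∀ (lines : List String), Dom_check_dupes_py lines → Spec_check_dupes_py lines (check_dupes_py lines)

-- ===== LEMMAS AND PROOFS =====

-- A's loop decides whether 'seen ++ filtered-rest' has a duplicate
theorem check_dupes_py_loop_eq (xs : List String) (seen : PySem.Set String)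
    (hs : seen.Nodup) :
    check_dupes_py_loop xs seen
      = decide ¬ (seen ++ xs.filter (fun l => decide (l ≠ "" ∧ PySem.Str.pyGet? l 0 ≠ some '$'))).Nodup := by
  induction xs generalizing seen with
  | nil => simp [check_dupes_py_loop, hs]
  | cons l rest ih =>
    rw [List.filter_cons]
    by_cases hb : (l ≠ "" ∧ PySem.Str.pyGet? l 0 ≠ some '$')
    · rw [if_pos (decide_eq_true hb)]
      unfold check_dupes_py_loop
      rw [if_pos hb]
      by_cases hc : l ∈ seen
      · have hct : PySem.Set.contains seen l = true := by
          simpa [PySem.Set.contains] using hc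
        rw [if_pos hct]
        have hnd : ¬ (seen ++ l :: rest.filter (fun l => decide (l ≠ "" ∧ PySem.Str.pyGet? l 0 ≠ some '$'))).Nodup := by
          rw [List.nodup_append]
          rintro ⟨-, -, hdisj⟩
          exact hdisj l hc l List.mem_cons_self rfl
        exact (decide_eq_true hnd).symm
      · have hcf : PySem.Set.contains seen l = false := by
          simpa [PySem.Set.contains] using hc
        rw [if_neg (by simpa [PySem.Set.contains] using hc)]
        have hadd : PySem.Set.add seen l = seen ++ [l] := by
          unfold PySem.Set.add
          rw [show PySem.Set.contains seen l = false from hcf]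
          simp
        have hnod : (seen ++ [l]).Nodup := by
          rw [List.nodup_append]
          refine ⟨hs, List.nodup_singleton l, ?_⟩
          intro a ha b hb
          rw [List.mem_singleton] at hb
          subst hb
          exact fun h => hc (h ▸ ha)
        rw [hadd, ih _ hnod, List.append_assoc]
        rfl
    · rw [if_neg (by simpa using hb)]
      unfold check_dupes_py_loop
      rw [if_neg hb]
      exact ih _ hs

-- folding Set.add over ys onto s appends a sublist of ys
theorem foldl_add_sublist {α : Type} [BEq α] (ys : List α) (s : PySem.Set α) :
    ∃ t, ys.foldl PySem.Set.add s = s ++ t ∧ t.Sublist ys := by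
  induction ys generalizing s with
  | nil => exact ⟨[], by simp, List.Sublist.refl _⟩
  | cons y ys ih =>
    rw [List.foldl_cons]
    by_cases hc : PySem.Set.contains s y = true
    · rw [show PySem.Set.add s y = s from by unfold PySem.Set.add; rw [hc]; simp]
      obtain ⟨t, ht, hsub⟩ := ih s
      exact ⟨t, ht, hsub.trans (List.sublist_cons_self y ys)⟩
    · rw [show PySem.Set.add s y = s ++ [y] from by
        unfold PySem.Set.add
        rw [show PySem.Set.contains s y = false from Bool.eq_false_iff.mpr hc]
        simp]
      obtain ⟨t, ht, hsub⟩ := ih (s ++ [y])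
      exact ⟨y :: t, by rw [ht, List.append_assoc]; rfl, hsub.cons_cons y⟩

theorem ofList_of_nodup {α : Type} [BEq α] [LawfulBEq α] (ys : List α) (h : ys.Nodup) :
    PySem.Set.ofList ys = ys := by
  have key : ∀ (ys : List α) (s : PySem.Set α), ys.Nodup → (∀ y ∈ ys, y ∉ s) →
      ys.foldl PySem.Set.add s = s ++ ys := by
    intro ys
    induction ys with
    | nil => simp
    | cons y ys ih =>
      intro s hn hd
      have hy : y ∉ s := hd y List.mem_cons_self
      have hc : PySem.Set.contains s y = false := by
        simpa [PySem.Set.contains] using hy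
      rw [List.foldl_cons, show PySem.Set.add s y = s ++ [y] from by
        unfold PySem.Set.add
        rw [show PySem.Set.contains s y = false from hc]
        simp]
      have hrec := ih (s ++ [y]) hn.of_cons (by
        intro z hz hmem
        rcases List.mem_append.mp hmem with h1 | h1
        · exact hd z (List.mem_cons_of_mem y hz) h1
        · rw [List.mem_singleton] at h1
          subst h1
          exact (List.nodup_cons.mp hn).1 hz)
      rw [hrec, List.append_assoc]
      rfl
  rw [PySem.Set.ofList_eq_foldl]
  simpa [PySem.Set.empty] using key ys PySem.Set.empty h (by simp [PySem.Set.empty])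

theorem length_ofList_eq_iff {α : Type} [BEq α] [LawfulBEq α] (ys : List α) :
    (PySem.Set.ofList ys).length = ys.length ↔ ys.Nodup := by
  constructor
  · intro hlen
    obtain ⟨t, ht, hsub⟩ := foldl_add_sublist ys (PySem.Set.empty (α := α))
    have hofl : PySem.Set.ofList ys = t := by
      rw [PySem.Set.ofList_eq_foldl]
      simpa [PySem.Set.empty] using ht
    have := hsub.eq_of_length (by rw [← hofl, hlen])
    rw [← this, ← hofl]
    exact PySem.Set.nodup_ofList ys
  · intro hn
    rw [ofList_of_nodup ys hn]

-- ===== VERDICT (by name: the statement is the Claim_ definition above) =====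
theorem check_dupes_py_spec : Claim_equal_check_dupes_py := by
  intro lines _
  unfold Spec_check_dupes_py check_dupes_py check_dupes_py_alt
  rw [check_dupes_py_loop_eq lines PySem.Set.empty List.nodup_nil]
  rw [show (PySem.Set.empty : PySem.Set String) ++ _ = lines.filter (fun l => decide (l ≠ "" ∧ PySem.Str.pyGet? l 0 ≠ some '$')) from List.nil_append _]
  set f := lines.filter (fun l => decide (l ≠ "" ∧ PySem.Str.pyGet? l 0 ≠ some '$')) with hf
  have hiff : (PySem.List.len f = PySem.Set.len (PySem.Set.ofList f)) ↔ f.Nodup := by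
    rw [PySem.List.len_eq, show PySem.Set.len (PySem.Set.ofList f) = ((PySem.Set.ofList f).length : Int) from PySem.List.len_eq _, Int.natCast_inj]
    exact ⟨fun h => (length_ofList_eq_iff f).mp h.symm, fun h => ((length_ofList_eq_iff f).mpr h).symm⟩
  rw [decide_eq_decide]
  exact not_congr hiff.symm
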